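-- pv_equiv track=rewrite | github.com/sean-wade/TLData_tools | select_tl_data.py | find_obj_seq
-- ===== SOURCE A (Python) =====
-- def find_obj_seq(obj_nums):
--     obj_nums = obj_nums + [0]   # add last stop
--     streak = 0
--     seqs = []
--     for i, num in enumerate(obj_nums):
--         if num > 0:
--             streak += 1
--         else:
--             if streak > 2:
--                 seqs.append([jj for jj in range(i-streak, i)])
--             streak = 0
--     return seqs
-- ===== SOURCE B (Python) =====
-- def find_obj_seq(obj_nums):
--     # Two-pointer scan: find each maximal run of positive numbers and emit
--     # its index range when it is longer than 2.
--     seqs = []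
--     n = len(obj_nums)
--     i = 0
--     while i < n:
--         if obj_nums[i] > 0:
--             j = i
--             while j < n and obj_nums[j] > 0:
--                 j += 1
--             if j - i > 2:
--                 seqs.append(list(range(i, j)))
--             i = j
--         else:
--             i += 1
--     return seqs
-- ===== Notes on version B (the rewrite author's own statement) =====
-- stated objective: alternative
-- what changed: Replaced the sentinel-append + running streak counter over enumerate with a two-pointer scan that locates each maximal positive run [i, j) directly and emits range(i, j); no sentinel element and no streak state are kept.
import Mathlib
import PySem

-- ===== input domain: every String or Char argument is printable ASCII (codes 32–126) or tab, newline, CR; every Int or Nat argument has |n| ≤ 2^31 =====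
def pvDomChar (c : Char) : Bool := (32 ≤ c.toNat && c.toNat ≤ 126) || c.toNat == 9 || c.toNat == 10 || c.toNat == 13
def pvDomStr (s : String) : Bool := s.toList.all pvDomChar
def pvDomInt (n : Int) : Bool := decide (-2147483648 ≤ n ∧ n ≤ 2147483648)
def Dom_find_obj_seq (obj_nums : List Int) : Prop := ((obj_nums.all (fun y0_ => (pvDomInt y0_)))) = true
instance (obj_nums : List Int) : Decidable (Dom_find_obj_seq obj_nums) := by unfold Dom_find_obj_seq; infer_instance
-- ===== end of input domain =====

-- B replaces A's sentinel-append + streak counter with a two-pointer scan over maximal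
-- positive runs (objective: alternative decomposition, same O(n) cost).

-- ===== PORT A =====
-- the 'for i, num in enumerate(obj_nums)' loop, carrying (i, streak, seqs)
def find_obj_seq_go : List Int → Int → Int → List (List Int) → List (List Int)
  | [], _, _, seqs => seqs
  | num :: rest, i, streak, seqs =>
    if num > 0 then
      find_obj_seq_go rest (i + 1) (streak + 1) seqs
    else
      find_obj_seq_go rest (i + 1) 0
        (if streak > 2 then seqs ++ [PySem.List.pyRange (i - streak) i 1] else seqs)

def find_obj_seq (obj_nums : List Int) : List (List Int) :=
  find_obj_seq_go (obj_nums ++ [0]) 0 0 []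

-- ===== PORT B =====
-- the inner 'while j < n and obj_nums[j] > 0' loop: length of the leading positive run
def posRun : List Int → Nat
  | [] => 0
  | x :: xs => if x > 0 then posRun xs + 1 else 0

-- the outer while loop: at a positive element, measure the maximal run, emit if > 2, jump past it
def find_obj_seq_alt_go : List Int → Int → List (List Int)
  | [], _ => []
  | x :: rest, i =>
    if x > 0 then
      (if ((posRun rest + 1 : Nat) : Int) > 2 then
          [PySem.List.pyRange i (i + ((posRun rest + 1 : Nat) : Int)) 1]
        else []) ++
        find_obj_seq_alt_go (rest.drop (posRun rest)) (i + ((posRun rest + 1 : Nat) : Int))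
    else
      find_obj_seq_alt_go rest (i + 1)
termination_by xs _ => xs.length
decreasing_by all_goals (simp only [List.length_drop, List.length_cons]; omega)

def find_obj_seq_alt (obj_nums : List Int) : List (List Int) :=
  find_obj_seq_alt_go obj_nums 0

-- ===== PRECONDITION & SPEC =====
def Spec_find_obj_seq (obj_nums : List Int) (out : List (List Int)) : Prop := out = find_obj_seq_alt obj_nums
instance (obj_nums : List Int) (out : List (List Int)) : Decidable (Spec_find_obj_seq obj_nums out) := by unfold Spec_find_obj_seq; infer_instance

-- ===== CLAIM (what is proved, stated in full; the proofs are below) =====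
def Claim_equal_find_obj_seq : Prop := ∀ (obj_nums : List Int), Dom_find_obj_seq obj_nums → Spec_find_obj_seq obj_nums (find_obj_seq obj_nums)

-- ===== LEMMAS AND PROOFS =====

-- unfolding equations for the well-founded recursion of B's port
lemma alt_go_nil (i : Int) : find_obj_seq_alt_go [] i = [] := by
  rw [find_obj_seq_alt_go]

lemma alt_go_pos (x : Int) (rest : List Int) (i : Int) (hx : x > 0) :
    find_obj_seq_alt_go (x :: rest) i =
      (if ((posRun rest + 1 : Nat) : Int) > 2 then
          [PySem.List.pyRange i (i + ((posRun rest + 1 : Nat) : Int)) 1]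
        else []) ++
        find_obj_seq_alt_go (rest.drop (posRun rest)) (i + ((posRun rest + 1 : Nat) : Int)) := by
  rw [find_obj_seq_alt_go]; simp [hx]

lemma alt_go_nonpos (x : Int) (rest : List Int) (i : Int) (hx : ¬ x > 0) :
    find_obj_seq_alt_go (x :: rest) i = find_obj_seq_alt_go rest (i + 1) := by
  rw [find_obj_seq_alt_go]; simp [hx]

-- the element after a maximal positive run is not positive
lemma posRun_drop_head : ∀ (xs : List Int) (y : Int) (ys : List Int),
    xs.drop (posRun xs) = y :: ys → ¬ y > 0 := by
  intro xs
  induction xs with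
  | nil => intro y ys h; simp at h
  | cons x xs ih =>
    intro y ys h
    by_cases hx : x > 0
    · simp [posRun, hx] at h
      exact ih y ys h
    · simp [posRun, hx] at h
      exact h.1 ▸ hx

-- A's loop consumes a leading positive run by just incrementing i and streak
lemma find_obj_seq_go_run : ∀ (xs : List Int) (i streak : Int) (seqs : List (List Int)),
    find_obj_seq_go (xs ++ [0]) i streak seqs =
      find_obj_seq_go (xs.drop (posRun xs) ++ [0]) (i + (posRun xs : Int)) (streak + (posRun xs : Int)) seqs := by
  intro xs
  induction xs with
  | nil => intro i streak seqs; simp [posRun]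
  | cons x xs ih =>
    intro i streak seqs
    by_cases hx : x > 0
    · simp only [posRun, hx, if_pos, List.cons_append, find_obj_seq_go, List.drop_succ_cons]
      rw [ih]
      congr 1 <;> push_cast <;> ring
    · simp [posRun, hx]

lemma main_lemma : ∀ (n : Nat) (xs : List Int), xs.length ≤ n →
    ∀ (i : Int) (seqs : List (List Int)),
      find_obj_seq_go (xs ++ [0]) i 0 seqs = seqs ++ find_obj_seq_alt_go xs i := by
  intro n
  induction n with
  | zero =>
    intro xs hlen i seqs
    have : xs = [] := by cases xs <;> simp_all
    subst this
    simp [find_obj_seq_go, alt_go_nil]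
  | succ n ih =>
    intro xs hlen i seqs
    cases xs with
    | nil => simp [find_obj_seq_go, alt_go_nil]
    | cons x rest =>
      by_cases hx : x > 0
      · rw [List.cons_append, show find_obj_seq_go (x :: (rest ++ [0])) i 0 seqs =
              find_obj_seq_go (rest ++ [0]) (i + 1) (0 + 1) seqs from by
            simp [find_obj_seq_go, hx]]
        rw [find_obj_seq_go_run rest (i + 1) (0 + 1) seqs]
        rcases hdrop : rest.drop (posRun rest) with _ | ⟨y, ys⟩
        · -- run reaches the end of the list; the sentinel 0 closes it
          simp only [find_obj_seq_go, List.nil_append]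
          have h0 : ¬ ((0 : Int) > 0) := by omega
          rw [if_neg h0]
          rw [alt_go_pos x rest i hx, hdrop, alt_go_nil]
          by_cases hk : (0 : Int) + 1 + (posRun rest : Int) > 2
          · rw [if_pos hk, if_pos (by push_cast; omega)]
            simp [find_obj_seq_go]
            congr 1
            ring
          · rw [if_neg hk, if_neg (by push_cast; omega)]
            simp [find_obj_seq_go]
        · -- run is closed by a non-positive element y
          have hy : ¬ y > 0 := posRun_drop_head rest y ys hdrop
          rw [show find_obj_seq_go ((y :: ys) ++ [0]) (i + 1 + (posRun rest : Int)) (0 + 1 + (posRun rest : Int)) seqs =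
                find_obj_seq_go (ys ++ [0]) (i + 1 + (posRun rest : Int) + 1) 0
                  (if (0 : Int) + 1 + (posRun rest : Int) > 2 then
                     seqs ++ [PySem.List.pyRange ((i + 1 + (posRun rest : Int)) - ((0 : Int) + 1 + (posRun rest : Int))) (i + 1 + (posRun rest : Int)) 1]
                   else seqs) from by
              simp [find_obj_seq_go, hy]]
          have hys : ys.length ≤ n := by
            have := List.length_drop (l := rest) (i := posRun rest)
            rw [hdrop] at this
            simp at this hlen ⊢
            omega
          rw [ih ys hys]
          rw [alt_go_pos x rest i hx, hdrop,
              alt_go_nonpos y ys (i + ((posRun rest + 1 : Nat) : Int)) hy]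
          by_cases hk : (0 : Int) + 1 + (posRun rest : Int) > 2
          · rw [if_pos hk, if_pos (by push_cast at hk ⊢; omega)]
            rw [List.append_assoc]
            congr 2
            · congr 1 <;> push_cast <;> ring
            · congr 1; push_cast; ring
          · rw [if_neg hk, if_neg (by push_cast at hk ⊢; omega)]
            simp only [List.nil_append]
            congr 1; push_cast; ring
      · rw [List.cons_append, show find_obj_seq_go (x :: (rest ++ [0])) i 0 seqs =
              find_obj_seq_go (rest ++ [0]) (i + 1) 0 seqs from by
            simp [find_obj_seq_go, hx]]
        rw [ih rest (by simpa using Nat.le_of_succ_le_succ hlen), alt_go_nonpos x rest i hx]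

-- ===== VERDICT (by name: the statement is the Claim_ definition above) =====
theorem find_obj_seq_spec : Claim_equal_find_obj_seq := by
  intro obj_nums _
  unfold Spec_find_obj_seq find_obj_seq find_obj_seq_alt
  simpa using main_lemma obj_nums.length obj_nums (le_refl _) 0 []
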